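-- pv_equiv track=rewrite | github.com/lrodrin/TFG | src/final/Clan.py | primalClansDict
-- ===== SOURCE A (Python) =====
-- from collections import defaultdict
--
-- def primalClansDict(primalClansList):
--     """
--     Returns a reversed dictionary of the primal clans. Keys are primal clans and their values are the primal
--     clans that contains each key
--
--     :param primalClansList: List of primal clans
--     :type primalClansList: list
--     :return: A primal clans dictionary
--     :rtype: dict
--     """
--     primalClansDict = defaultdict(list)  # Creates and initializes a dictionary of list
--     for i in range(len(primalClansList) - 1, 0, -1):  # For each primal clan
--         for j in range(i - 1, -1, -1):
--             if primalClansList[j].issubset(primalClansList[i]):  # If primalClansList[j] is a subset of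
--                 # primalClansList[i]
--                 for k in range(j + 1, i):  # Search if between primalClansList[j] and primalClansList[i]
--                     # there are more primal clans
--                     if primalClansList[k].issubset(primalClansList[i]) and primalClansList[j].issubset(
--                             primalClansList[k]):  # If primalClansList[k] is a subset of primalClansList[i] and
--                         # primalClansList[j] is a subset of primalClansList[k]
--                         break
--                 else:
--                     primalClansDict[frozenset(primalClansList[i])].append(primalClansList[j])  # Add primal clan
--                     #  to primal clans dict
--
--     return primalClansDict
-- ===== SOURCE B (Python) =====
-- def primalClansDict(primalClansList):
--     """One descending sweep per clan with an accumulator of the subsets already seen,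
--     so A's innermost index scan over range(j+1, i) disappears."""
--     result = {}
--     for i in range(len(primalClansList) - 1, 0, -1):
--         target = primalClansList[i]
--         covers = []
--         seen = []  # subsets of target at indices strictly between j and i, grown as j descends
--         for j in range(i - 1, -1, -1):
--             s = primalClansList[j]
--             if s.issubset(target):
--                 if not any(s.issubset(t) for t in seen):
--                     covers.append(s)
--                 seen.append(s)
--         if covers:
--             result.setdefault(frozenset(target), []).extend(covers)
--     return result
-- ===== Notes on version B (the rewrite author's own statement) =====
-- stated objective: alternative
-- what changed: B replaces A's innermost index scan over range(j+1, i) by a single descending sweep per clan that maintains an accumulator 'seen' of the subsets already encountered (exactly those at indices strictly between j and i), testing each candidate against that accumulator and merging the collected covers into the dict once per clan via setdefault/extend instead of A's per-element defaultdict appends.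
import Mathlib
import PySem

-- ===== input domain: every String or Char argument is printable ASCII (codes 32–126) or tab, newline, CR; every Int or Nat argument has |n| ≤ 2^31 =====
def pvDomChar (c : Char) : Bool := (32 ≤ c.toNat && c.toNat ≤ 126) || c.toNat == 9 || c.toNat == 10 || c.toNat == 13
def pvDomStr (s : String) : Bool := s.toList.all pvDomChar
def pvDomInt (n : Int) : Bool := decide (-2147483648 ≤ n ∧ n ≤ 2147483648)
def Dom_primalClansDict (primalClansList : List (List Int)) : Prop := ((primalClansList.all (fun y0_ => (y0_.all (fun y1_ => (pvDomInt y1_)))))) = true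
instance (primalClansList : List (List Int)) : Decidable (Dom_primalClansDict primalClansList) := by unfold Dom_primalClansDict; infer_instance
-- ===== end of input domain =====

-- B replaces A's innermost index scan by one descending sweep per clan that maintains an
-- accumulator of the subsets already seen (alternative decomposition, same worst-case cost).
-- Inner lists stand for Python sets: s.issubset(t) is an all/contains test, and frozenset(s)
-- is ported as the canonical representative 'sorted distinct elements' so that equal sets are equal keys.

-- ===== PORT A =====
-- frozenset(s) as a canonical key: sorted distinct elements
def pvKey (s : List Int) : List Int := PySem.List.sorted (PySem.List.dedup s) (fun x => x) false

def primalClansDict (primalClansList : List (List Int)) : List (List Int × List (List Int)) :=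
  let xs := primalClansList
  let n : Int := xs.length
  let d : PySem.Dict (List Int) (List (List Int)) :=
    (PySem.List.pyRange (n - 1) 0 (-1)).foldl (fun d i =>
      (PySem.List.pyRange (i - 1) (-1) (-1)).foldl (fun d j =>
        if PySem.Set.issubset (PySem.List.pyGetD xs j []) (PySem.List.pyGetD xs i []) then
          -- for k in range(j+1, i): … break / else: append  (pure loop body ⇒ break/else is an any-test)
          if (PySem.List.pyRange (j + 1) i 1).any (fun k =>
                PySem.Set.issubset (PySem.List.pyGetD xs k []) (PySem.List.pyGetD xs i []) &&
                PySem.Set.issubset (PySem.List.pyGetD xs j []) (PySem.List.pyGetD xs k [])) then d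
          else
            -- primalClansDict[frozenset(xs[i])].append(xs[j])  (defaultdict(list))
            d.modify (pvKey (PySem.List.pyGetD xs i [])) [] (· ++ [PySem.List.pyGetD xs j []])
        else d) d) PySem.Dict.empty
  d.items

-- ===== PORT B =====
def primalClansDict_alt (primalClansList : List (List Int)) : List (List Int × List (List Int)) :=
  let xs := primalClansList
  let n : Int := xs.length
  let d : PySem.Dict (List Int) (List (List Int)) :=
    (PySem.List.pyRange (n - 1) 0 (-1)).foldl (fun d i =>
      let target := PySem.List.pyGetD xs i []
      -- one descending sweep: pr.1 = covers, pr.2 = seen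
      let pr : List (List Int) × List (List Int) :=
        (PySem.List.pyRange (i - 1) (-1) (-1)).foldl
          (fun (pr : List (List Int) × List (List Int)) j =>
            let s := PySem.List.pyGetD xs j []
            if PySem.Set.issubset s target then
              (if pr.2.any (fun t => PySem.Set.issubset s t) then pr.1 else pr.1 ++ [s],
               pr.2 ++ [s])
            else pr) ([], [])
      if pr.1.isEmpty then d
      else d.insert (pvKey target) (d.getD (pvKey target) [] ++ pr.1)) PySem.Dict.empty
  d.items

-- ===== PRECONDITION & SPEC =====
def Spec_primalClansDict (primalClansList : List (List Int)) (out : List (List Int × List (List Int))) : Prop := out = primalClansDict_alt primalClansList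
instance (primalClansList : List (List Int)) (out : List (List Int × List (List Int))) : Decidable (Spec_primalClansDict primalClansList out) := by unfold Spec_primalClansDict; infer_instance

-- ===== CLAIM (what is proved, stated in full; the proofs are below) =====
def Claim_equal_primalClansDict : Prop := ∀ (primalClansList : List (List Int)), Dom_primalClansDict primalClansList → Spec_primalClansDict primalClansList (primalClansDict primalClansList)

-- ===== LEMMAS AND PROOFS =====

-- A's inner j-loop (one defaultdict append per passing j) equals one extend by the filtered list
lemma pv_inner_fold (K : List Int) (p q : Int → Bool) (v : Int → List Int) :
    ∀ (js : List Int) (d : PySem.Dict (List Int) (List (List Int))),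
      js.foldl (fun d j =>
          if p j then (if q j then d else d.modify K [] (· ++ [v j])) else d) d
        = if (js.filter (fun j => p j && !q j)).isEmpty then d
          else d.insert K (d.getD K [] ++ (js.filter (fun j => p j && !q j)).map v) := by
  intro js
  induction js with
  | nil => intro d; simp
  | cons j rest ih =>
    intro d
    have hmod : ∀ (e : PySem.Dict (List Int) (List (List Int))),
        e.modify K [] (· ++ [v j]) = e.insert K (e.getD K [] ++ [v j]) :=
      fun e => PySem.Dict.ext_iff.mpr rfl
    simp only [List.foldl_cons, List.filter_cons]
    by_cases hp : p j
    · by_cases hq : q j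
      · simp [hp, hq, ih d]
      · rw [if_pos hp, if_neg hq, hmod, ih]
        have hc : (p j && !q j) = true := by simp [hp, hq]
        rw [hc]
        by_cases he : (rest.filter (fun j => p j && !q j)).isEmpty
        · rw [if_pos he, List.isEmpty_iff.mp he]
          simp
        · rw [if_neg he]
          simp [PySem.Dict.getD_insert_self, PySem.Dict.insert_insert_self]
    · simp [hp, ih d]

-- A's break-test over the index window (j, i) equals the any-test over the seen accumulator
lemma pv_any (i j : Int) (p : Int → Bool) (v : Int → List Int) (F : List Int → Bool) :
    (PySem.List.pyRange (j + 1) i 1).any (fun k => p k && F (v k))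
      = ((((PySem.List.pyRange (i - 1) j (-1)).filter p).map v).any F) := by
  rw [List.any_map, List.any_filter, Bool.eq_iff_iff]
  simp only [List.any_eq_true, PySem.List.mem_pyRange_one, PySem.List.mem_pyRange_neg_one]
  constructor
  · rintro ⟨k, ⟨h1, h2⟩, h3⟩; exact ⟨k, ⟨by omega, by omega⟩, h3⟩
  · rintro ⟨k, ⟨h1, h2⟩, h3⟩; exact ⟨k, ⟨by omega, by omega⟩, h3⟩

-- B's accumulator sweep computes A's filtered list, given seen = subsets at indices above a
lemma pv_acc (i : Int) (p : Int → Bool) (v : Int → List Int) (F : Int → List Int → Bool) :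
    ∀ (n : Nat) (a : Int), (a + 1).toNat = n → a < i → ∀ (cs : List (List Int)),
      ((PySem.List.pyRange a (-1) (-1)).foldl
          (fun (pr : List (List Int) × List (List Int)) j =>
            if p j then
              (if pr.2.any (F j) then pr.1 else pr.1 ++ [v j], pr.2 ++ [v j])
            else pr)
          (cs, ((PySem.List.pyRange (i - 1) a (-1)).filter p).map v)).1
        = cs ++ ((PySem.List.pyRange a (-1) (-1)).filter
            (fun j => p j && !((((PySem.List.pyRange (i - 1) j (-1)).filter p).map v).any (F j)))).map v := by
  set body := fun (pr : List (List Int) × List (List Int)) j =>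
    if p j then
      (if pr.2.any (F j) then pr.1 else pr.1 ++ [v j], pr.2 ++ [v j])
    else pr with hbody
  intro n
  induction n with
  | zero =>
    intro a ha _ cs
    rw [PySem.List.pyRange_neg_one_eq_nil (by omega : a ≤ -1)]
    simp
  | succ m ih =>
    intro a ha hai cs
    have ha0 : 0 ≤ a := by omega
    have hsplit : PySem.List.pyRange (i - 1) (a - 1) (-1)
        = PySem.List.pyRange (i - 1) a (-1) ++ [a] := by
      rw [PySem.List.pyRange_neg_one_eq_reverse, PySem.List.pyRange_neg_one_eq_reverse]
      have e1 : a - 1 + 1 = a := by omega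
      have e2 : i - 1 + 1 = i := by omega
      rw [e1, e2, PySem.List.pyRange_one_cons hai, List.reverse_cons]
    rw [PySem.List.pyRange_neg_one_cons (by omega : (-1:Int) < a)]
    rw [List.foldl_cons, List.filter_cons]
    by_cases hp : p a
    · by_cases hq : ((((PySem.List.pyRange (i - 1) a (-1)).filter p).map v).any (F a))
      · have hstep : body (cs, ((PySem.List.pyRange (i - 1) a (-1)).filter p).map v) a
            = (cs, ((PySem.List.pyRange (i - 1) (a - 1) (-1)).filter p).map v) := by
          rw [hbody]
          dsimp only
          rw [if_pos hp, if_pos hq, hsplit, List.filter_append, List.map_append]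
          simp [hp]
        have hc : (p a && !((((PySem.List.pyRange (i - 1) a (-1)).filter p).map v).any (F a))) = false := by
          simp [hp, hq]
        rw [hstep, hc, if_neg (by simp), ih (a - 1) (by omega) (by omega) cs]
      · have hstep : body (cs, ((PySem.List.pyRange (i - 1) a (-1)).filter p).map v) a
            = (cs ++ [v a], ((PySem.List.pyRange (i - 1) (a - 1) (-1)).filter p).map v) := by
          rw [hbody]
          dsimp only
          rw [if_pos hp, if_neg (by simp [hq]), hsplit, List.filter_append, List.map_append]
          simp [hp]
        have hc : (p a && !((((PySem.List.pyRange (i - 1) a (-1)).filter p).map v).any (F a))) = true := by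
          simp [hp, hq]
        rw [hstep, hc, if_pos rfl, ih (a - 1) (by omega) (by omega) (cs ++ [v a])]
        simp
    · have hstep : body (cs, ((PySem.List.pyRange (i - 1) a (-1)).filter p).map v) a
          = (cs, ((PySem.List.pyRange (i - 1) (a - 1) (-1)).filter p).map v) := by
        rw [hbody]
        dsimp only
        rw [if_neg (by simp [hp]), hsplit, List.filter_append]
        simp [hp]
      rw [hstep, if_neg (by simp [hp]), ih (a - 1) (by omega) (by omega) cs]

-- ===== VERDICT (by name: the statement is the Claim_ definition above) =====
theorem primalClansDict_spec : Claim_equal_primalClansDict := by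
  intro xs _
  unfold Spec_primalClansDict primalClansDict primalClansDict_alt
  dsimp only
  congr 1
  apply PySem.List.foldl_congr_mem
  intro d i hi
  rw [PySem.List.mem_pyRange_neg_one] at hi
  set p : Int → Bool := fun k =>
    PySem.Set.issubset (PySem.List.pyGetD xs k []) (PySem.List.pyGetD xs i []) with hp
  set v : Int → List Int := fun j => PySem.List.pyGetD xs j [] with hv
  set F : Int → List Int → Bool := fun j t => PySem.Set.issubset (PySem.List.pyGetD xs j []) t with hF
  rw [pv_inner_fold (pvKey (PySem.List.pyGetD xs i [])) p
        (fun j => (PySem.List.pyRange (j + 1) i 1).any (fun k => p k && F j (v k)))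
        v]
  have hfil :
      (PySem.List.pyRange (i - 1) (-1) (-1)).filter
          (fun j => p j && !((PySem.List.pyRange (j + 1) i 1).any (fun k => p k && F j (v k))))
        = (PySem.List.pyRange (i - 1) (-1) (-1)).filter
            (fun j => p j && !((((PySem.List.pyRange (i - 1) j (-1)).filter p).map v).any (F j))) := by
    apply List.filter_congr
    intro j _
    rw [pv_any i j p v (F j)]
  rw [hfil]
  have hacc := pv_acc i p v F (i - 1 + 1).toNat (i - 1) rfl (by omega) []
  rw [PySem.List.pyRange_neg_one_eq_nil (by omega : i - 1 ≤ i - 1)] at hacc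
  simp only [List.filter_nil, List.map_nil] at hacc
  rw [hacc, List.nil_append, List.isEmpty_map]
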